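-- pv_equiv track=rewrite | github.com/polionus/torch-learning-policy-spaces | utils/args.py | generate_command_combinations
-- ===== SOURCE A (Python) =====
-- import itertools
--
-- def generate_command_combinations(base_cmd: str, param_variations: dict, boolean_flags: list):
--     """
--     Generate all combinations of parameters.
--     Boolean flags are added to all commands.
--     """
--     if not param_variations:
--         # Only boolean flags, no variations
--         cmd_parts = [base_cmd]
--         for flag in boolean_flags:
--             cmd_parts.append(f"--{flag}")
--         return [" ".join(cmd_parts)]
--
--     param_names = list(param_variations.keys())
--     param_values = [param_variations[name] for name in param_names]
--
--     commands = []
--     for combination in itertools.product(*param_values):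
--         cmd_parts = [base_cmd]
--
--         # Add boolean flags first
--         for flag in boolean_flags:
--             cmd_parts.append(f"--{flag}")
--
--         # Add parameters with values
--         for param_name, param_value in zip(param_names, combination):
--             cmd_parts.append(f"--{param_name} {param_value}")
--
--         commands.append(" ".join(cmd_parts))
--
--     return commands
-- ===== SOURCE B (Python) =====
-- def generate_command_combinations(base_cmd: str, param_variations: dict, boolean_flags: list):
--     """
--     Generate all combinations of parameters.
--     Boolean flags are added to all commands.
--     """
--     prefix = " ".join([base_cmd] + ["--" + flag for flag in boolean_flags])
--     items = list(param_variations.items())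
--     total = 1
--     for _, values in items:
--         total *= len(values)
--     commands = []
--     for rank in range(total):
--         r = rank
--         parts = []
--         # decode the rank as a mixed-radix number, least-significant digit = last parameter
--         for name, values in reversed(items):
--             r, d = divmod(r, len(values))
--             parts.append(f"--{name} {values[d]}")
--         commands.append(" ".join([prefix] + parts[::-1]))
--     return commands
-- ===== Notes on version B (the rewrite author's own statement) =====
-- stated objective: alternative
-- what changed: Replaces itertools.product enumeration of finished value tuples by mixed-radix rank decoding: the total count is computed as the product of the value-list lengths and each command is reconstructed independently from its index in range(total) by repeated divmod, so no product/tuple machinery and no empty-dict special case remain.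
import Mathlib
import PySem

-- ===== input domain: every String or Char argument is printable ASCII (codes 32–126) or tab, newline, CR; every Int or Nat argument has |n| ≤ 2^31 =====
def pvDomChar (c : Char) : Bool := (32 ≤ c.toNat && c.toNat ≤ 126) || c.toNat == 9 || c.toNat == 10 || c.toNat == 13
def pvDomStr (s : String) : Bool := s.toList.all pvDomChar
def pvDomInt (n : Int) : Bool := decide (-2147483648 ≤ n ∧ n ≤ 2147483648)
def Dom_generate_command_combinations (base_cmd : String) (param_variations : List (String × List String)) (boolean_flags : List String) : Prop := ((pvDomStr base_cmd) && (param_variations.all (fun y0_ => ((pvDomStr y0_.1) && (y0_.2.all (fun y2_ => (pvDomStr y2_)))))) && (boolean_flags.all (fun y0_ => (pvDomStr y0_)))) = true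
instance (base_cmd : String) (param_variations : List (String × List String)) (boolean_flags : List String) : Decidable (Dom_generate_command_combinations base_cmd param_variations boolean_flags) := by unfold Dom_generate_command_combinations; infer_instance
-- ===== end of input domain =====

-- B replaces product enumeration by mixed-radix rank decoding: each command is computed
-- independently from its index in range(total) (alternative algorithm, same cost, same value).

-- ===== PORT A =====
-- itertools.product(*value_lists), leftmost varying slowest (exact order of itertools.product)
def pvProduct (xss : List (List String)) : List (List String) :=
  match xss with
  | [] => [[]]
  | vs :: rest => vs.flatMap (fun v => (pvProduct rest).map (fun t => v :: t))

def generate_command_combinations (base_cmd : String) (param_variations : List (String × List String)) (boolean_flags : List String) : List String :=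
  if param_variations = [] then
    [PySem.Str.join " " (base_cmd :: boolean_flags.map (fun f => "--" ++ f))]
  else
    -- param_names = list(keys); param_values = [d[name] for name in param_names]:
    -- under Pre_ (no duplicate keys) the first-match lookup returns each pair's own value
    let param_names := param_variations.map (fun p => p.1)
    let param_values := param_variations.map (fun p => p.2)
    (pvProduct param_values).map (fun combination =>
      PySem.Str.join " "
        ((base_cmd :: boolean_flags.map (fun f => "--" ++ f)) ++
          (param_names.zip combination).map (fun p => "--" ++ p.1 ++ " " ++ p.2)))

-- ===== PORT B =====
-- one divmod step of Source B's inner loop: extract the digit for one parameter.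
-- the index d is always in range (0 ≤ d < len, len > 0 whenever the loop runs), so
-- pyGet? is always `some` and the getD default is never used.
def pvStep (st : Int × List String) (p : String × List String) : Int × List String :=
  let len : Int := (p.2.length : Int)
  let d := PySem.Int.mod st.1 len
  let r := PySem.Int.floordiv st.1 len
  (r, st.2 ++ ["--" ++ p.1 ++ " " ++ ((PySem.List.pyGet? p.2 d).getD "")])

def generate_command_combinations_alt (base_cmd : String) (param_variations : List (String × List String)) (boolean_flags : List String) : List String :=
  let pref := PySem.Str.join " " (base_cmd :: boolean_flags.map (fun f => "--" ++ f))
  let total : Int := param_variations.foldl (fun t p => t * (p.2.length : Int)) 1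
  (PySem.List.pyRange 0 total 1).map (fun rank =>
    let parts := (param_variations.reverse.foldl pvStep (rank, [])).2
    PySem.Str.join " " (pref :: parts.reverse))

-- ===== PRECONDITION & SPEC =====
-- Pre_ excludes association lists with duplicate keys: those cannot arise from a Python dict
-- (Python collapses them), so the list representation there is accidental.
def Pre_generate_command_combinations (base_cmd : String) (param_variations : List (String × List String)) (boolean_flags : List String) : Prop :=
  (param_variations.map (fun p => p.1)).Nodup
instance (base_cmd : String) (param_variations : List (String × List String)) (boolean_flags : List String) : Decidable (Pre_generate_command_combinations base_cmd param_variations boolean_flags) := by unfold Pre_generate_command_combinations; infer_instance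

def pvWitness_generate_command_combinations : String × (List (String × List String)) × List String :=
  ("python train.py", [("lr", ["0.1", "0.01"]), ("bs", ["32"])], ["verbose"])

def Spec_generate_command_combinations (base_cmd : String) (param_variations : List (String × List String)) (boolean_flags : List String) (out : List String) : Prop := out = generate_command_combinations_alt base_cmd param_variations boolean_flags
instance (base_cmd : String) (param_variations : List (String × List String)) (boolean_flags : List String) (out : List String) : Decidable (Spec_generate_command_combinations base_cmd param_variations boolean_flags out) := by unfold Spec_generate_command_combinations; infer_instance

-- ===== CLAIM =====
def Claim_equal_generate_command_combinations : Prop := ∀ (base_cmd : String) (param_variations : List (String × List String)) (boolean_flags : List String), Dom_generate_command_combinations base_cmd param_variations boolean_flags → Pre_generate_command_combinations base_cmd param_variations boolean_flags → Spec_generate_command_combinations base_cmd param_variations boolean_flags (generate_command_combinations base_cmd param_variations boolean_flags)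

-- ===== LEMMAS AND PROOFS =====

def pvFmt (n v : String) : String := "--" ++ n ++ " " ++ v

-- total number of combinations
def pvT (pv : List (String × List String)) : Nat := (pv.map (fun p => p.2.length)).prod

-- digits of a rank, least-significant first (the order Source B's inner loop appends them)
def pvDecodeRev : List (String × List String) → Nat → List String
  | [], _ => []
  | (n, vs) :: rest, b => pvFmt n (vs.getD (b % vs.length) "") :: pvDecodeRev rest (b / vs.length)

def pvDecodeFwd (pv : List (String × List String)) (b : Nat) : List String :=
  (pvDecodeRev pv.reverse b).reverse

-- the parameter parts of all commands, in A's (itertools.product) order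
def pvCombos : List (String × List String) → List (List String)
  | [] => [[]]
  | (n, vs) :: rest => vs.flatMap (fun v => (pvCombos rest).map (fun t => pvFmt n v :: t))

theorem pv_loop_eq (rl : List (String × List String)) (q b : Nat) (parts : List String)
    (hb : b < pvT rl) :
    rl.foldl pvStep (((q * pvT rl + b : Nat) : Int), parts) = ((q : Int), parts ++ pvDecodeRev rl b) := by
  induction rl generalizing q b parts with
  | nil =>
    simp only [pvT, List.map_nil, List.prod_nil, Nat.lt_one_iff] at hb
    subst hb
    simp [pvDecodeRev, pvT]
  | cons p rest ih =>
    obtain ⟨n, vs⟩ := p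
    have hT : pvT ((n, vs) :: rest) = vs.length * pvT rest := by simp [pvT]
    rw [hT] at hb
    have hL : 0 < vs.length := by by_contra h; simp [Nat.le_zero.mp (Nat.not_lt.mp h)] at hb
    have hTr : 0 < pvT rest := by by_contra h; simp [Nat.le_zero.mp (Nat.not_lt.mp h)] at hb
    have key : q * pvT ((n, vs) :: rest) + b = (q * pvT rest + b / vs.length) * vs.length + b % vs.length := by
      rw [hT]
      have := Nat.div_add_mod b vs.length
      ring_nf
      omega
    rw [key]
    simp only [List.foldl_cons, pvStep, PySem.Int.mod_natCast, PySem.Int.floordiv_natCast,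
      PySem.List.pyGet?_natCast]
    have hm : ((q * pvT rest + b / vs.length) * vs.length + b % vs.length) % vs.length = b % vs.length := by
      rw [Nat.add_comm, Nat.add_mul_mod_self_right]
      exact Nat.mod_mod_of_dvd b dvd_rfl
    have hd : ((q * pvT rest + b / vs.length) * vs.length + b % vs.length) / vs.length
        = q * pvT rest + b / vs.length := by
      rw [Nat.add_comm, Nat.add_mul_div_right _ _ hL, Nat.div_eq_of_lt (Nat.mod_lt b hL), Nat.zero_add]
    rw [hm, hd]
    rw [ih q (b / vs.length) _ ((Nat.div_lt_iff_lt_mul hL).mpr (by rw [Nat.mul_comm]; exact hb))]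
    simp [pvDecodeRev, pvFmt, List.getD_eq_getElem?_getD, List.append_assoc]

theorem pv_decodeRev_append (rl : List (String × List String)) (n : String) (vs : List String) (b : Nat) :
    pvDecodeRev (rl ++ [(n, vs)]) b = pvDecodeRev rl b ++ [pvFmt n (vs.getD (b / pvT rl % vs.length) "")] := by
  induction rl generalizing b with
  | nil => simp [pvDecodeRev, pvT]
  | cons p rest ih =>
    obtain ⟨m, ws⟩ := p
    simp only [List.cons_append, pvDecodeRev, ih, pvT, List.map_cons, List.prod_cons]
    rw [Nat.div_div_eq_div_mul]

theorem pv_decodeRev_mod (rl : List (String × List String)) (b : Nat) :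
    pvDecodeRev rl (b % pvT rl) = pvDecodeRev rl b := by
  induction rl generalizing b with
  | nil => simp [pvDecodeRev]
  | cons p rest ih =>
    obtain ⟨n, vs⟩ := p
    have hT : pvT ((n, vs) :: rest) = vs.length * pvT rest := by simp [pvT]
    simp only [pvDecodeRev, hT]
    rw [Nat.mod_mod_of_dvd _ ⟨pvT rest, rfl⟩, Nat.mod_mul_right_div_self, ih]

theorem pv_flatMap_range_getD {β : Type} (vs : List String) (g : String → List β) :
    vs.flatMap g = (List.range vs.length).flatMap (fun j => g (vs.getD j "")) := by
  induction vs with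
  | nil => simp
  | cons v vs' ih =>
    rw [List.length_cons, List.range_succ_eq_map]
    simp only [List.flatMap_cons, List.flatMap_map, List.getD_cons_zero, List.getD_cons_succ]
    rw [ih]

theorem pvT_reverse (pv : List (String × List String)) : pvT pv.reverse = pvT pv := by
  simp [pvT, List.map_reverse, List.prod_reverse]

theorem pv_range_mul (a b : Nat) :
    List.range (a * b) = (List.range a).flatMap (fun j => (List.range b).map (fun k => j * b + k)) := by
  induction a with
  | zero => simp
  | succ a ih =>
    rw [Nat.succ_mul, List.range_add, List.range_succ, List.flatMap_append, ← ih]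
    simp

theorem pv_decodeFwd_cons (n : String) (vs : List String) (rest : List (String × List String))
    (j k : Nat) (hj : j < vs.length) (hk : k < pvT rest) :
    pvDecodeFwd ((n, vs) :: rest) (j * pvT rest + k)
      = pvFmt n (vs.getD j "") :: pvDecodeFwd rest k := by
  unfold pvDecodeFwd
  rw [List.reverse_cons, pv_decodeRev_append, pvT_reverse]
  have hd : (j * pvT rest + k) / pvT rest = j := by
    rw [Nat.add_comm, Nat.add_mul_div_right _ _ (Nat.zero_lt_of_lt hk)]
    rw [Nat.div_eq_of_lt hk, Nat.zero_add]
  have hm : (j * pvT rest + k) % pvT rest = k := by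
    rw [Nat.add_comm, Nat.add_mul_mod_self_right, Nat.mod_eq_of_lt hk]
  have hdec : pvDecodeRev rest.reverse (j * pvT rest + k) = pvDecodeRev rest.reverse k := by
    rw [← pv_decodeRev_mod rest.reverse (j * pvT rest + k), pvT_reverse, hm]
  rw [hd, Nat.mod_eq_of_lt hj, hdec, List.reverse_append]
  simp

theorem pv_range_map_decode (pv : List (String × List String)) :
    (List.range (pvT pv)).map (pvDecodeFwd pv) = pvCombos pv := by
  induction pv with
  | nil =>
    have : pvT [] = 1 := by simp [pvT]
    rw [this]
    simp [pvDecodeFwd, pvDecodeRev, pvCombos]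
  | cons p rest ih =>
    obtain ⟨n, vs⟩ := p
    have hT : pvT ((n, vs) :: rest) = vs.length * pvT rest := by simp [pvT]
    rw [hT, pv_range_mul, List.map_flatMap, pvCombos,
      pv_flatMap_range_getD vs (fun v => (pvCombos rest).map (fun t => pvFmt n v :: t))]
    simp only [List.flatMap_def]
    congr 1
    apply List.map_congr_left
    intro j hj
    rw [List.map_map, ← ih, List.map_map]
    apply List.map_congr_left
    intro k hk
    simp only [Function.comp]
    exact pv_decodeFwd_cons n vs rest j k (List.mem_range.mp hj) (List.mem_range.mp hk)

theorem pv_product_eq_combos (pv : List (String × List String)) :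
    (pvProduct (pv.map (fun p => p.2))).map
        (fun combination => ((pv.map (fun p => p.1)).zip combination).map (fun q => "--" ++ q.1 ++ " " ++ q.2))
      = pvCombos pv := by
  induction pv with
  | nil => simp [pvProduct, pvCombos]
  | cons p rest ih =>
    simp only [List.map_cons, pvProduct, pvCombos, List.map_flatMap, List.map_map]
    congr 1
    funext v
    rw [← ih, List.map_map]
    simp [Function.comp, pvFmt]

-- join a nonempty group: " ".join([x] + rest) where x is itself a join
theorem pv_join_cons_of_join (sep : String) (a : String) (t rest : List String) :
    PySem.Str.join sep (PySem.Str.join sep (a :: t) :: rest) = PySem.Str.join sep ((a :: t) ++ rest) := by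
  have hstep : ∀ (s x y : List Char) (R : List (List Char)),
      PySem.Chars.join s ((x ++ s ++ y) :: R) = x ++ s ++ PySem.Chars.join s (y :: R) := by
    intro s x y R
    cases R with
    | nil => simp [PySem.Chars.join_singleton]
    | cons r R' =>
      rw [PySem.Chars.join_cons_cons, PySem.Chars.join_cons_cons]
      simp [List.append_assoc]
  have hchars : ∀ (s : List Char) (A : List Char) (T R : List (List Char)),
      PySem.Chars.join s (PySem.Chars.join s (A :: T) :: R) = PySem.Chars.join s ((A :: T) ++ R) := by
    intro s A T
    induction T generalizing A with
    | nil => intro R; rw [PySem.Chars.join_singleton]; rfl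
    | cons B T' ih =>
      intro R
      rw [PySem.Chars.join_cons_cons, hstep, ih B R]
      simp [PySem.Chars.join_cons_cons, List.append_assoc]
  apply String.toList_inj.mp
  rw [PySem.Str.toList_join, PySem.Str.toList_join, List.map_cons, PySem.Str.toList_join,
    List.map_append, List.map_cons]
  exact hchars _ _ _ _

theorem pv_total_eq (pv : List (String × List String)) (a : Int) :
    pv.foldl (fun t p => t * (p.2.length : Int)) a = a * (pvT pv : Int) := by
  induction pv generalizing a with
  | nil => simp [pvT]
  | cons p rest ih =>
    simp only [List.foldl_cons, ih, pvT, List.map_cons, List.prod_cons]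
    push_cast
    ring

theorem pv_str_join_singleton (sep x : String) : PySem.Str.join sep [x] = x := by
  apply String.toList_inj.mp
  rw [PySem.Str.toList_join, List.map_cons, List.map_nil, PySem.Chars.join_singleton]

theorem pv_alt_eq (base_cmd : String) (pv : List (String × List String)) (flags : List String) :
    generate_command_combinations_alt base_cmd pv flags
      = (List.range (pvT pv)).map (fun k =>
          PySem.Str.join " " (PySem.Str.join " " (base_cmd :: flags.map (fun f => "--" ++ f)) :: pvDecodeFwd pv k)) := by
  unfold generate_command_combinations_alt
  simp only []
  rw [pv_total_eq pv 1, one_mul, PySem.List.pyRange_one]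
  simp only [Int.sub_zero, Int.toNat_natCast, List.map_map]
  apply List.map_congr_left
  intro k hk
  simp only [Function.comp]
  have hk' : k < pvT pv.reverse := by rw [pvT_reverse]; exact List.mem_range.mp hk
  have hcast : ((0:ℤ) + (k:ℤ)) = ((0 * pvT pv.reverse + k : ℕ) : ℤ) := by push_cast; ring
  rw [hcast, pv_loop_eq pv.reverse 0 k [] hk']
  simp [pvDecodeFwd]

-- ===== VERDICT =====
theorem generate_command_combinations_spec : Claim_equal_generate_command_combinations := by
  intro base_cmd pv flags _ _
  show _ = _
  rw [pv_alt_eq]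
  unfold generate_command_combinations
  split
  · next h =>
    subst h
    have hT : pvT [] = 1 := by simp [pvT]
    rw [hT]
    simp [pvDecodeFwd, pvDecodeRev, pv_str_join_singleton]
  · next h =>
    show (pvProduct (pv.map (fun p => p.2))).map _ = _
    rw [show (fun combination => PySem.Str.join " " ((base_cmd :: flags.map (fun f => "--" ++ f)) ++ ((pv.map (fun p => p.1)).zip combination).map (fun p => "--" ++ p.1 ++ " " ++ p.2))) = (fun parts => PySem.Str.join " " ((base_cmd :: flags.map (fun f => "--" ++ f)) ++ parts)) ∘ (fun combination => ((pv.map (fun p => p.1)).zip combination).map (fun p => "--" ++ p.1 ++ " " ++ p.2)) from rfl]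
    rw [← List.map_map, pv_product_eq_combos, ← pv_range_map_decode, List.map_map]
    apply List.map_congr_left
    intro k _
    simp only [Function.comp]
    exact (pv_join_cons_of_join " " base_cmd (flags.map (fun f => "--" ++ f)) (pvDecodeFwd pv k)).symm
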